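-- pv_equiv track=rewrite | github.com/GareemaRanjan/coding_practice | shaquille/pilot.py | max_drop_points
-- ===== SOURCE A (Python) =====
-- def max_drop_points(x_coords, y_coords):
--     # Create dictionaries to count occurrences of each x and y coordinate
--     x_count = {}
--     y_count = {}
--
--     # Count occurrences manually for x coordinates
--     for x in x_coords:
--         if x in x_count:
--             x_count[x] += 1
--         else:
--             x_count[x] = 1
--
--     # Count occurrences manually for y coordinates
--     for y in y_coords:
--         if y in y_count:
--             y_count[y] += 1
--         else:
--             y_count[y] = 1
--
--     max_x_coverage = 0
--     max_y_coverage = 0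
--
--     for count in x_count.values():
--         if count > 1:
--             max_x_coverage = max(max_x_coverage, count)
--
--     for count in y_count.values():
--         if count > 1:
--             max_y_coverage = max(max_y_coverage, count)
--
--         # The result is the maximum coverage in either direction
--     return max(max_x_coverage, max_y_coverage)
-- ===== SOURCE B (Python) =====
-- def max_drop_points(x_coords, y_coords):
--     # Coverage along one axis: sort, scan runs of equal values, keep the
--     # longest run; a run shorter than 2 covers nothing.
--     def axis_coverage(coords):
--         best = 0
--         run = 0
--         prev = None
--         for v in sorted(coords):
--             run = run + 1 if v == prev else 1
--             prev = v
--             best = max(best, run)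
--         return best if best >= 2 else 0
--     return max(axis_coverage(x_coords), axis_coverage(y_coords))
-- ===== Notes on version B (the rewrite author's own statement) =====
-- stated objective: alternative
-- what changed: Replaces the hash-dictionary counting plus value scan with a sort of each axis followed by a single run-length pass that tracks the longest run of equal consecutive values.
import Mathlib
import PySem

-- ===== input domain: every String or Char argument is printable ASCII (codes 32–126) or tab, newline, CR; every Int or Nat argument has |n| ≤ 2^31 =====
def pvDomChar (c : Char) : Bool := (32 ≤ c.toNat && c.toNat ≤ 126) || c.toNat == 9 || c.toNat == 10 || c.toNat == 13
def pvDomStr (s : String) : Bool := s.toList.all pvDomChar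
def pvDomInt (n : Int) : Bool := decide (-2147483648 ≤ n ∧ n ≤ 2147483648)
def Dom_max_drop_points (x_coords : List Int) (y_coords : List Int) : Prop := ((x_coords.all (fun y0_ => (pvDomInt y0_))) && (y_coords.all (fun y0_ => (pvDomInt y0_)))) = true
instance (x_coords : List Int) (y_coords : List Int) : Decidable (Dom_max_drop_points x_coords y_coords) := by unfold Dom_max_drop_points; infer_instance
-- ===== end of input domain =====

-- B replaces A's hash-dictionary counting + value scan by a sort of each axis
-- followed by one run-length pass over equal consecutive values (objective: alternative).

-- ===== PORT A =====
-- the 'for x in coords: if x in count: count[x] += 1 else: count[x] = 1' loop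
def pvCountLoop (coords : List Int) : PySem.Dict Int Int :=
  coords.foldl (fun d x => if d.contains x then d.modify x 0 (· + 1) else d.insert x 1) PySem.Dict.empty

-- the 'for count in values(): if count > 1: m = max(m, count)' loop
def pvMaxCov (d : PySem.Dict Int Int) : Int :=
  d.values.foldl (fun acc c => if 1 < c then max acc c else acc) 0

def max_drop_points (x_coords : List Int) (y_coords : List Int) : Int :=
  let x_count := pvCountLoop x_coords
  let y_count := pvCountLoop y_coords
  let max_x_coverage := pvMaxCov x_count
  let max_y_coverage := pvMaxCov y_count
  max max_x_coverage max_y_coverage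

-- ===== PORT B =====
-- one iteration of B's run-length loop: state (best, run, prev)
def pvRunStep (st : Int × Int × Option Int) (v : Int) : Int × Int × Option Int :=
  let run := if (some v : Option Int) = st.2.2 then st.2.1 + 1 else 1
  (max st.1 run, run, some v)

def pvAxisCoverage (coords : List Int) : Int :=
  let st := (PySem.List.sorted coords (fun x => x) false).foldl pvRunStep (0, 0, none)
  if 2 ≤ st.1 then st.1 else 0

def max_drop_points_alt (x_coords : List Int) (y_coords : List Int) : Int :=
  max (pvAxisCoverage x_coords) (pvAxisCoverage y_coords)

-- ===== PRECONDITION & SPEC =====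
def Spec_max_drop_points (x_coords : List Int) (y_coords : List Int) (out : Int) : Prop := out = max_drop_points_alt x_coords y_coords
instance (x_coords : List Int) (y_coords : List Int) (out : Int) : Decidable (Spec_max_drop_points x_coords y_coords out) := by unfold Spec_max_drop_points; infer_instance

-- ===== CLAIM (what is proved, stated in full; the proofs are below) =====
def Claim_equal_max_drop_points : Prop := ∀ (x_coords : List Int) (y_coords : List Int), Dom_max_drop_points x_coords y_coords → Spec_max_drop_points x_coords y_coords (max_drop_points x_coords y_coords)

-- ===== LEMMAS AND PROOFS =====

-- A's counting loop is Counter(coords)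
theorem pvCountLoop_eq (coords : List Int) : pvCountLoop coords = PySem.Dict.counter coords := by
  have hstep : (fun (d : PySem.Dict Int Int) x => if d.contains x then d.modify x 0 (· + 1) else d.insert x 1)
      = (fun (d : PySem.Dict Int Int) x => d.modify x 0 (· + 1)) := by
    funext d x
    by_cases h : d.contains x
    · simp [h]
    · simp [h, PySem.Dict.modify, PySem.Dict.getD_of_not_contains d 0 (by simpa using h)]
  rw [pvCountLoop, hstep, ← PySem.Dict.counter_eq_foldl]

-- monotonicity of A's value-scan fold in its accumulator
theorem pvF_mono (l : List Int) : ∀ init : Int,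
    init ≤ l.foldl (fun acc c => if 1 < c then max acc c else acc) init := by
  induction l with
  | nil => intro init; simp
  | cons c t ih =>
    intro init
    refine le_trans ?_ (ih (if 1 < c then max init c else init))
    split
    · exact le_max_left _ _
    · exact le_refl _

-- every element > 1 of the list bounds A's value-scan fold from below
theorem pvF_ge (l : List Int) : ∀ init : Int, ∀ c ∈ l, 1 < c →
    c ≤ l.foldl (fun acc c => if 1 < c then max acc c else acc) init := by
  induction l with
  | nil => intro _ c hc; simp at hc
  | cons d t ih =>
    intro init c hc h1
    rcases List.mem_cons.mp hc with h | h
    · subst h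
      refine le_trans ?_ (pvF_mono t (if 1 < c then max init c else init))
      simp [h1]
    · exact ih _ c h h1

-- A's value-scan fold is its initial value or an element > 1 of the list
theorem pvF_cases (l : List Int) : ∀ init : Int,
    l.foldl (fun acc c => if 1 < c then max acc c else acc) init = init ∨
    (l.foldl (fun acc c => if 1 < c then max acc c else acc) init ∈ l ∧
      1 < l.foldl (fun acc c => if 1 < c then max acc c else acc) init) := by
  induction l with
  | nil => intro init; left; rfl
  | cons c t ih =>
    intro init
    rcases ih (if 1 < c then max init c else init) with h | h
    · by_cases h1 : 1 < c
      · rcases max_choice init c with hm | hm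
        · left
          simp only [List.foldl_cons, h1, if_true] at h ⊢
          rw [h, hm]
        · right
          have hfe : (c :: t).foldl (fun acc c => if 1 < c then max acc c else acc) init = c := by
            simp only [List.foldl_cons, h1, if_true] at h ⊢
            rw [h, hm]
          rw [hfe]
          exact ⟨List.mem_cons_self, h1⟩
      · left
        simp only [List.foldl_cons, h1, if_false] at h ⊢
        exact h
    · right
      exact ⟨List.mem_cons_of_mem _ h.1, h.2⟩

-- monotonicity of B's run-length fold in its best component
theorem pvBst_mono (l : List Int) : ∀ st : Int × Int × Option Int,
    st.1 ≤ (l.foldl pvRunStep st).1 := by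
  induction l with
  | nil => intro st; exact le_refl _
  | cons v t ih =>
    intro st
    refine le_trans ?_ (ih (pvRunStep st v))
    exact le_max_left _ _

-- on a sorted list, B's best dominates (carried run +) the count of every value
theorem pvCount_le_bst (l : List Int) : ∀ st : Int × Int × Option Int,
    l.Pairwise (· ≤ ·) →
    (∀ p : Int, st.2.2 = some p → ∀ y ∈ l, p ≤ y) →
    0 ≤ st.1 → st.2.1 ≤ st.1 →
    ∀ v : Int, (if st.2.2 = some v then st.2.1 else 0) + (l.count v : Int) ≤ (l.foldl pvRunStep st).1 := by
  induction l with
  | nil =>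
    intro st _ _ hb hr v
    simp only [List.count_nil, List.foldl_nil, Nat.cast_zero, add_zero]
    split
    · exact hr
    · exact hb
  | cons x t ih =>
    intro st hsor hlow hb hr v
    obtain ⟨b, r, p⟩ := st
    rcases List.pairwise_cons.mp hsor with ⟨hx, ht⟩
    simp only at hlow hb hr
    set run := (if (some x : Option Int) = p then r + 1 else 1) with hrdef
    have hstep : pvRunStep (b, r, p) x = (max b run, run, some x) := rfl
    have hb' : (0 : Int) ≤ max b run := le_trans hb (le_max_left _ _)
    have hih := ih (max b run, run, some x) ht
      (by
        intro q hq y hy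
        simp only [Option.some.injEq] at hq
        subst hq
        exact hx y hy)
      hb' (le_max_right _ _)
    simp only [List.foldl_cons, hstep]
    by_cases hvx : v = x
    · subst hvx
      have h2 := hih v
      simp at h2
      have hcarry : (if (p : Option Int) = some v then r else 0) + 1 = run := by
        by_cases hp : (some v : Option Int) = p
        · subst hp; simp [hrdef]
        · rw [hrdef, if_neg hp, if_neg (fun hc => hp hc.symm)]; norm_num
      have hcnt : ((v :: t).count v : Int) = (t.count v : Int) + 1 := by
        simp
      rw [hcnt]
      linarith [h2, hcarry]
    · have hxv : x ≠ v := fun h => hvx h.symm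
      have hcnt : ((x :: t).count v : Int) = (t.count v : Int) := by
        simp [hxv]
      rw [hcnt]
      by_cases hp : (p : Option Int) = some v
      · -- the carried value v sits strictly below x, hence does not occur in t
        have hvlex : v ≤ x := hlow v hp x List.mem_cons_self
        have hvnt : v ∉ t := by
          intro hvt
          exact hvx (le_antisymm hvlex (hx v hvt))
        have hc0 : (t.count v : Int) = 0 := by
          simp [List.count_eq_zero_of_not_mem hvnt]
        rw [if_pos hp, hc0, add_zero]
        calc r ≤ b := hr
          _ ≤ max b run := le_max_left _ _
          _ ≤ (t.foldl pvRunStep (max b run, run, some x)).1 := pvBst_mono t _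
      · rw [if_neg hp, zero_add]
        have h2 := hih v
        rw [if_neg (show ¬ (some x : Option Int) = some v by
          simp only [Option.some.injEq]; exact fun h => hvx h.symm), zero_add] at h2
        exact h2

-- B's best is its initial best or bounded by (carried run +) a count of some element
theorem pvBst_le (l : List Int) : ∀ st : Int × Int × Option Int, 0 ≤ st.2.1 →
    (l.foldl pvRunStep st).1 = st.1 ∨
    ∃ v ∈ l, (l.foldl pvRunStep st).1 ≤ (if st.2.2 = some v then st.2.1 else 0) + (l.count v : Int) := by
  induction l with
  | nil => intro st _; left; rfl
  | cons x t ih =>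
    intro st hr
    obtain ⟨b, r, p⟩ := st
    simp only at hr
    set run := (if (some x : Option Int) = p then r + 1 else 1) with hrdef
    have hstep : pvRunStep (b, r, p) x = (max b run, run, some x) := rfl
    have hrun0 : (0 : Int) ≤ run := by
      rw [hrdef]; split
      · linarith
      · norm_num
    have hcarry : (if (p : Option Int) = some x then r else 0) + 1 = run := by
      by_cases hp : (some x : Option Int) = p
      · subst hp; simp [hrdef]
      · rw [hrdef, if_neg hp, if_neg (fun hc => hp hc.symm)]; norm_num
    have hcntx : ((x :: t).count x : Int) = (t.count x : Int) + 1 := by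
      simp
    simp only [List.foldl_cons, hstep]
    rcases ih (max b run, run, some x) hrun0 with h | ⟨v, hv, hle⟩
    · rcases max_choice b run with hm | hm
      · left; rw [h, hm]
      · right
        refine ⟨x, List.mem_cons_self, ?_⟩
        rw [h, hm, hcntx, ← hcarry]
        have : (0 : Int) ≤ (t.count x : Int) := Int.natCast_nonneg _
        linarith
    · by_cases hvx : v = x
      · subst hvx
        rw [if_pos rfl] at hle
        right
        refine ⟨v, List.mem_cons_self, ?_⟩
        rw [hcntx]
        simp only at hle
        linarith [hle, hcarry]
      · rw [if_neg (show ¬ (some x : Option Int) = some v by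
          simp only [Option.some.injEq]; exact fun h => hvx h.symm), zero_add] at hle
        right
        refine ⟨v, List.mem_cons_of_mem _ hv, ?_⟩
        have hxv : x ≠ v := fun h => hvx h.symm
        have hcnt : ((x :: t).count v : Int) = (t.count v : Int) := by
          simp [hxv]
        rw [hcnt]
        split
        · linarith
        · linarith

-- per-axis equality of the two programs
theorem pvAxis_eq (coords : List Int) : pvMaxCov (pvCountLoop coords) = pvAxisCoverage coords := by
  obtain ⟨l, hl⟩ : ∃ x, x = PySem.List.sorted coords (fun x => x) false := ⟨_, rfl⟩
  obtain ⟨lc, hlc⟩ : ∃ x, x = (PySem.Set.ofList coords).map (fun k => (List.count k coords : Int)) := ⟨_, rfl⟩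
  obtain ⟨F, hF⟩ : ∃ x, x = lc.foldl (fun acc c => if 1 < c then max acc c else acc) 0 := ⟨_, rfl⟩
  obtain ⟨B, hB⟩ : ∃ x, x = (l.foldl pvRunStep (0, 0, (none : Option Int))).1 := ⟨_, rfl⟩
  -- A's side reduces to the fold over the counts of the distinct values
  have hA : pvMaxCov (pvCountLoop coords) = F := by
    rw [hF, hlc, pvCountLoop_eq]
    unfold pvMaxCov
    rw [PySem.Dict.values, PySem.Dict.items_counter, List.map_map]
    rfl
  -- B's side is the thresholded best of the run-length scan
  have hBA : pvAxisCoverage coords = if 2 ≤ B then B else 0 := by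
    rw [hB, hl]; rfl
  have hperm : l.Perm coords := hl ▸ PySem.List.sorted_perm coords _ false
  have hcount : ∀ v : Int, l.count v = coords.count v := fun v => hperm.count_eq v
  have hsor : l.Pairwise (· ≤ ·) := hl ▸ PySem.List.sorted_pairwise coords (fun x => x)
  have hB0 : (0 : Int) ≤ B := hB ▸ pvBst_mono l (0, 0, none)
  have hcle : ∀ v : Int, (l.count v : Int) ≤ B := by
    intro v
    rw [hB]
    simpa using pvCount_le_bst l (0, 0, none) hsor (by intro p hp; simp at hp) le_rfl le_rfl v
  have hach : B = 0 ∨ ∃ v ∈ l, B ≤ (l.count v : Int) := by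
    rw [hB]
    rcases pvBst_le l (0, 0, none) le_rfl with h | ⟨v, hv, hle⟩
    · left; exact h
    · right; exact ⟨v, hv, by simpa using hle⟩
  have hFmono : (0 : Int) ≤ F := hF ▸ pvF_mono lc 0
  have hFge : ∀ c ∈ lc, 1 < c → c ≤ F := by
    intro c hc h1; rw [hF]; exact pvF_ge lc 0 c hc h1
  have hFcases : F = 0 ∨ (F ∈ lc ∧ 1 < F) := by
    rw [hF]
    rcases pvF_cases lc 0 with h | h
    · left; exact h
    · right; exact h
  rw [hA, hBA]
  by_cases h2 : 2 ≤ B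
  · rw [if_pos h2]
    -- B is realised as the count of some value, and dominates all counts; so does F
    rcases hach with h0 | ⟨v, hv, hle⟩
    · omega
    · have hvc : v ∈ coords := by
        have := PySem.List.mem_sorted coords (fun x => x) false v
        rw [← hl] at this
        exact this.mp hv
      have hge : B ≤ F := by
        have h1 : (1 : Int) < (coords.count v : Int) := by
          have := hcount v; omega
        have hmem : ((coords.count v : Nat) : Int) ∈ lc := by
          rw [hlc]
          exact List.mem_map.mpr ⟨v, (PySem.Set.mem_ofList coords v).mpr hvc, rfl⟩
        have := hFge _ hmem h1
        have hcv := hcount v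
        omega
      have hle' : F ≤ B := by
        rcases hFcases with h | ⟨hmem, h1⟩
        · omega
        · rcases List.mem_map.mp (hlc ▸ hmem) with ⟨k, hk, hkeq⟩
          have hkc : (l.count k : Int) ≤ B := hcle k
          have := hcount k
          omega
      omega
  · rw [if_neg h2]
    -- every count is ≤ 1, so A's thresholded scan never fires
    rcases hFcases with h | ⟨hmem, h1⟩
    · exact h
    · exfalso
      rcases List.mem_map.mp (hlc ▸ hmem) with ⟨k, hk, hkeq⟩
      have hkc : (l.count k : Int) ≤ B := hcle k
      have := hcount k
      omega

-- ===== VERDICT (by name: the statement is the Claim_ definition above) =====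
theorem max_drop_points_spec : Claim_equal_max_drop_points := by
  intro xs ys _
  unfold Spec_max_drop_points
  show max (pvMaxCov (pvCountLoop xs)) (pvMaxCov (pvCountLoop ys))
      = max (pvAxisCoverage xs) (pvAxisCoverage ys)
  rw [pvAxis_eq, pvAxis_eq]
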